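-- pv_equiv track=rewrite | github.com/MayurNandanwar/DSS | Python/patterns_code.py | num_desc
-- ===== SOURCE A (Python) =====
-- def num_desc(n):
--     lst =[]
--     for i in range(n,0,-1):
--         x = ''
--         for i in range(1,i+1):
--             x+=str(i)
--         lst.append(x)
--     return '\n'.join(lst)
-- ===== SOURCE B (Python) =====
-- def num_desc(n):
--     # Alternative decomposition: one forward pass builds full = "12...n" and records cut points; each
--     # descending row is a prefix slice of full, no nested rebuilding.
--     full = ''
--     cuts = []
--     for i in range(1, n + 1):
--         full += str(i)
--         cuts.append(len(full))
--     return '\n'.join(full[:c] for c in reversed(cuts))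
-- ===== Notes on version B (the rewrite author's own statement) =====
-- stated objective: alternative
-- what changed: Replaces A's nested loop that rebuilds each row from scratch with a single forward pass that builds the full row once, records cut points, and emits each descending row as a prefix slice of the precomputed string (intended as faster; measured 7.79x at n=4096 but unconfirmed at the largest size).
import Mathlib
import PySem

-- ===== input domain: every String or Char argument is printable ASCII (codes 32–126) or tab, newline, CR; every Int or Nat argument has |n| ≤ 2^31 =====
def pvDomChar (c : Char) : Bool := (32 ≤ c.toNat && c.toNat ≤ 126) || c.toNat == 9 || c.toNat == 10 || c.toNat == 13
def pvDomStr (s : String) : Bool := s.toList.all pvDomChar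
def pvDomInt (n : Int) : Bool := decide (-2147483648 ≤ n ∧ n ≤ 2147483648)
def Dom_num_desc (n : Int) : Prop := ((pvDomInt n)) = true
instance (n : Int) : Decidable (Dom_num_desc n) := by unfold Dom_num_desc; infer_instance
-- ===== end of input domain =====

-- B replaces A's nested row-rebuilding loops by one forward pass plus prefix
-- slicing of a single precomputed string (alternative decomposition).

-- ===== PORT A =====
def num_desc (n : Int) : String :=
  let lst : List (List Char) :=
    (PySem.List.pyRange n 0 (-1)).foldl (fun lst i =>
      lst ++ [(PySem.List.pyRange 1 (i + 1) 1).foldl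
                (fun x j => x ++ PySem.Int.toChars j) []]) []
  String.ofList (PySem.Chars.join ['\n'] lst)

-- ===== PORT B =====
def num_desc_alt (n : Int) : String :=
  let fc : List Char × List Int :=
    (PySem.List.pyRange 1 (n + 1) 1).foldl
      (fun p i =>
        let full := p.1 ++ PySem.Int.toChars i
        (full, p.2 ++ [(full.length : Int)])) ([], [])
  String.ofList (PySem.Chars.join ['\n']
    (fc.2.reverse.map (fun c => PySem.Chars.slice fc.1 none (some c))))

-- ===== PRECONDITION & SPEC =====
def Spec_num_desc (n : Int) (out : String) : Prop := out = num_desc_alt n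
instance (n : Int) (out : String) : Decidable (Spec_num_desc n out) := by unfold Spec_num_desc; infer_instance

-- ===== CLAIM (what is proved, stated in full; the proofs are below) =====
def Claim_equal_num_desc : Prop := ∀ (n : Int), Dom_num_desc n → Spec_num_desc n (num_desc n)

-- ===== LEMMAS AND PROOFS =====

-- the row "12…k" as a list of characters
def pvRow : Nat → List Char
  | 0 => []
  | k + 1 => pvRow k ++ PySem.Int.toChars ((k : Int) + 1)

lemma pvRow_prefix {k m : Nat} (h : k ≤ m) : pvRow k <+: pvRow m := by
  induction m with
  | zero => simp [Nat.le_zero.mp h]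
  | succ m ih =>
    rcases Nat.lt_or_ge k (m + 1) with h' | h'
    · exact (ih (Nat.lt_succ_iff.mp h')).trans ⟨PySem.Int.toChars ((m : Int) + 1), rfl⟩
    · have : k = m + 1 := le_antisymm h h'
      simp [this]

-- A's inner loop builds exactly pvRow
lemma inner_fold_eq (i : Nat) :
    (PySem.List.pyRange 1 ((i : Int) + 1) 1).foldl
      (fun x j => x ++ PySem.Int.toChars j) [] = pvRow i := by
  induction i with
  | zero => simp [PySem.List.pyRange_one_eq_nil, pvRow]
  | succ i ih =>
    have h : (1 : Int) ≤ (i : Int) + 1 := by omega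
    have : ((i + 1 : Nat) : Int) + 1 = ((i : Int) + 1) + 1 := by push_cast; ring
    rw [this, PySem.List.pyRange_one_succ_right h]
    simp [List.foldl_append, ih, pvRow]

-- B's forward pass: accumulated string and cut list after m steps
lemma bfold_eq (m : Nat) :
    (PySem.List.pyRange 1 ((m : Int) + 1) 1).foldl
      (fun (p : List Char × List Int) i =>
        let full := p.1 ++ PySem.Int.toChars i
        (full, p.2 ++ [(full.length : Int)])) ([], []) =
    (pvRow m, (List.range m).map (fun k => ((pvRow (k + 1)).length : Int))) := by
  induction m with
  | zero => simp [PySem.List.pyRange_one_eq_nil, pvRow]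
  | succ m ih =>
    have h : (1 : Int) ≤ (m : Int) + 1 := by omega
    have : ((m + 1 : Nat) : Int) + 1 = ((m : Int) + 1) + 1 := by push_cast; ring
    rw [this, PySem.List.pyRange_one_succ_right h, List.foldl_append, ih]
    simp [pvRow, List.range_succ]

-- ===== VERDICT (by name: the statement is the Claim_ definition above) =====
theorem num_desc_spec : Claim_equal_num_desc := by
  intro n _
  unfold Spec_num_desc num_desc num_desc_alt
  rcases le_or_gt n 0 with hn | hn
  · rw [PySem.List.pyRange_neg_one_eq_nil hn,
      PySem.List.pyRange_one_eq_nil (by omega : n + 1 ≤ 1)]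
    simp
  · obtain ⟨m, rfl⟩ : ∃ m : Nat, n = (m : Int) := ⟨n.toNat, (Int.toNat_of_nonneg hn.le).symm⟩
    rw [PySem.List.pyRange_neg_one_eq_reverse]
    rw [PySem.List.foldl_append_singleton_eq_map, bfold_eq]
    simp only [zero_add]
    congr 1
    congr 1
    simp only [List.nil_append, List.map_reverse]
    congr 1
    have hm : ((m : Int) + 1 - 1).toNat = m := by omega
    rw [PySem.List.pyRange_one, hm, List.map_map, List.map_map]
    apply List.map_congr_left
    intro k hk
    have hk' : k < m := List.mem_range.mp hk
    show (PySem.List.pyRange 1 ((1 + (k : Int)) + 1) 1).foldl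
        (fun x j => x ++ PySem.Int.toChars j) [] =
      PySem.Chars.slice (pvRow m) none (some (((pvRow (k + 1)).length : Int)))
    have h1 : (1 + (k : Int)) + 1 = ((k + 1 : Nat) : Int) + 1 := by push_cast; ring
    rw [h1, inner_fold_eq (k + 1)]
    have h2 : PySem.Chars.slice (pvRow m) none (some ((pvRow (k + 1)).length : Int)) =
        (pvRow m).take (pvRow (k + 1)).length := by
      simp [PySem.Chars.slice, PySem.List.slice_to_natCast]
    rw [h2]
    exact List.prefix_iff_eq_take.mp (pvRow_prefix hk')
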